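-- pv_equiv track=rewrite | github.com/augini/algorithms_ds | BinarySearch/contest/min_substring.py | solve
-- ===== SOURCE A (Python) =====
-- from collections import Counter
--
-- def solve(s, t):
--     s_map = Counter(s)
--     t_map = Counter(t)
--
--     changes = 0
--
--     for item in t_map.keys():
--         s_item = s_map[item]
--         t_item = t_map[item]
--
--         if s_item != t_item:
--             if t_item > s_item:
--                 changes+=abs(t_item - s_item)
--
--     return changes
-- ===== SOURCE B (Python) =====
-- def solve(s, t):
--     ss = sorted(s)
--     tt = sorted(t)
--     i = 0
--     changes = 0
--     for ch in tt:
--         while i < len(ss) and ss[i] < ch: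
--             i += 1
--         if i < len(ss) and ss[i] == ch:
--             i += 1
--         else:
--             changes += 1
--     return changes
-- ===== Notes on version B (the rewrite author's own statement) =====
-- stated objective: alternative
-- what changed: Replaces A's two hash Counters and a keys loop with sorting both strings and a single two-pointer merge walk that counts each character of t left unmatched in s.
import Mathlib
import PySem

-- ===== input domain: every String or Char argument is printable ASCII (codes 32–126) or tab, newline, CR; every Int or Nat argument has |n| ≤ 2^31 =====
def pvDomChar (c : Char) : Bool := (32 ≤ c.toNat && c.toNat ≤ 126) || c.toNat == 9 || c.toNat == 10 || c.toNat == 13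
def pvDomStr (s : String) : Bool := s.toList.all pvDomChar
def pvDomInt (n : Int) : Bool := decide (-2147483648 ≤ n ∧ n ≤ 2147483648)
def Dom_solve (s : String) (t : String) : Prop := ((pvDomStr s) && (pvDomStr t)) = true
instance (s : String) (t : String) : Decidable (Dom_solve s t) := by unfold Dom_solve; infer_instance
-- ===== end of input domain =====

-- B replaces A's Counter-and-subtract with a two-pointer merge walk over the two sorted
-- character sequences (objective: alternative decomposition, same result).

-- ===== PORT A =====
def solve (s : String) (t : String) : Int :=
  let sMap := PySem.Dict.counter s.toList
  let tMap := PySem.Dict.counter t.toList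
  tMap.keys.foldl (fun changes item =>
    let sItem := sMap.getD item 0
    let tItem := tMap.getD item 0
    if sItem ≠ tItem then
      if tItem > sItem then changes + |tItem - sItem| else changes
    else changes) 0

-- ===== PORT B =====
-- Source B's 'for ch in tt' loop with the persistent index i into ss: the suffix of ss from i is
-- carried as the first argument; the inner 'while ss[i] < ch: i += 1' is the dropWhile.
def solveWalk : List Char → List Char → Int
  | _, [] => 0
  | ss, ch :: tt =>
    match ss.dropWhile (fun a => decide (a < ch)) with
    | a :: rest => if a = ch then solveWalk rest tt else 1 + solveWalk (a :: rest) tt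
    | [] => 1 + solveWalk [] tt

def solve_alt (s : String) (t : String) : Int :=
  solveWalk (PySem.List.sorted s.toList (fun c => c) false)
            (PySem.List.sorted t.toList (fun c => c) false)

-- ===== PRECONDITION & SPEC =====
def Spec_solve (s : String) (t : String) (out : Int) : Prop := out = solve_alt s t
instance (s : String) (t : String) (out : Int) : Decidable (Spec_solve s t out) := by unfold Spec_solve; infer_instance

-- ===== CLAIM (what is proved, stated in full; the proofs are below) =====
def Claim_equal_solve : Prop := ∀ (s : String) (t : String), Dom_solve s t → Spec_solve s t (solve s t)

-- ===== LEMMAS AND PROOFS =====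

-- count of c is 0 in a list all of whose elements exceed c
theorem count_eq_zero_of_lt_all {c : Char} {l : List Char} (h : ∀ y ∈ l, c < y) :
    List.count c l = 0 :=
  List.count_eq_zero.2 (fun hm => lt_irrefl c (h c hm))

-- A computes the cardinality of the multiset difference t - s
theorem solve_eq (s t : String) :
    solve s t = (((↑t.toList : Multiset Char) - ↑s.toList).card : Int) := by
  unfold solve
  simp only [PySem.Dict.keys_counter]
  have hpt : ∀ (acc : Int), ∀ c ∈ PySem.Set.ofList t.toList,
      (let sItem := (PySem.Dict.counter s.toList).getD c 0
       let tItem := (PySem.Dict.counter t.toList).getD c 0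
       if sItem ≠ tItem then
         if tItem > sItem then acc + |tItem - sItem| else acc
       else acc)
      = acc + ((List.count c t.toList - List.count c s.toList : Nat) : Int) := by
    intro acc c _
    simp only [PySem.Dict.getD_counter]
    split_ifs with h1 h2
    · rw [abs_of_nonneg (by omega)]; omega
    · omega
    · omega
  rw [PySem.List.foldl_congr_mem _ _ _ _ hpt, PySem.List.foldl_add, zero_add]
  have h1 : ((PySem.Set.ofList t.toList).map
        (fun c => ((List.count c t.toList - List.count c s.toList : Nat) : Int))).sum
      = ((((PySem.Set.ofList t.toList).map
        (fun c => List.count c t.toList - List.count c s.toList)).sum : Nat) : Int) := by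
    rw [Nat.cast_list_sum, List.map_map]; rfl
  rw [h1]
  congr 1
  rw [← List.sum_toFinset _ (PySem.Set.nodup_ofList t.toList)]
  have hfs : (PySem.Set.ofList t.toList).toFinset = t.toList.toFinset := by
    ext c; simp [PySem.Set.mem_ofList]
  rw [hfs]
  have hsub : ((↑t.toList : Multiset Char) - ↑s.toList).toFinset ⊆ t.toList.toFinset := by
    intro c hc
    simp only [Multiset.mem_toFinset] at hc
    have h2 := Multiset.count_pos.2 hc
    rw [Multiset.count_sub] at h2
    simp only [Multiset.coe_count] at h2
    simp only [List.mem_toFinset]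
    exact List.count_pos_iff.1 (by omega)
  calc ∑ c ∈ t.toList.toFinset, (List.count c t.toList - List.count c s.toList)
      = ∑ c ∈ t.toList.toFinset, ((↑t.toList : Multiset Char) - ↑s.toList).count c := by
        refine Finset.sum_congr rfl fun c _ => ?_
        simp only [Multiset.count_sub, Multiset.coe_count]
    _ = ∑ c ∈ ((↑t.toList : Multiset Char) - ↑s.toList).toFinset,
          ((↑t.toList : Multiset Char) - ↑s.toList).count c :=
        (Finset.sum_subset hsub (fun c _ hcn => Multiset.count_eq_zero.2 (by simpa using hcn))).symm
    _ = _ := Multiset.toFinset_sum_count_eq _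

-- the merge walk over sorted lists computes the same multiset-difference cardinality
theorem solveWalk_card : ∀ (tt ss : List Char), ss.Pairwise (· ≤ ·) → tt.Pairwise (· ≤ ·) →
    solveWalk ss tt = (((↑tt : Multiset Char) - ↑ss).card : Int) := by
  intro tt
  induction tt with
  | nil => intro ss _ _; simp [solveWalk]
  | cons ch tt ih =>
    intro ss hss htt
    have htt' : tt.Pairwise (· ≤ ·) := (List.pairwise_cons.1 htt).2
    have hch : ∀ y ∈ tt, ch ≤ y := (List.pairwise_cons.1 htt).1
    have hsplit : ss.takeWhile (fun a => decide (a < ch)) ++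
        ss.dropWhile (fun a => decide (a < ch)) = ss := List.takeWhile_append_dropWhile
    have hpre : ∀ x ∈ ss.takeWhile (fun a => decide (a < ch)), x < ch := by
      intro x hx
      have := List.mem_takeWhile_imp hx
      simpa using this
    cases hdrop : ss.dropWhile (fun a => decide (a < ch)) with
    | nil =>
      have hall : ∀ x ∈ ss, x < ch := by
        have hts : ss.takeWhile (fun a => decide (a < ch)) = ss := by
          rw [hdrop] at hsplit; simpa using hsplit
        intro x hx; exact hpre x (by rw [hts]; exact hx)
      have hm : ((ch :: tt : List Char) : Multiset Char) - ↑ss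
          = ((ch :: tt : List Char) : Multiset Char) := by
        ext c
        simp only [Multiset.count_sub, Multiset.coe_count]
        by_cases hc : c < ch
        · have h0 : List.count c (ch :: tt) = 0 := count_eq_zero_of_lt_all (by
            intro y hy
            rcases List.mem_cons.1 hy with rfl | hy'
            · exact hc
            · exact lt_of_lt_of_le hc (hch y hy'))
          simp [h0]
        · have h0 : List.count c ss = 0 := List.count_eq_zero.2
            (fun hmem => hc (hall c hmem))
          simp [h0]
      simp only [solveWalk, hdrop]
      rw [hm, ← Multiset.cons_coe, Multiset.card_cons,
        ih [] (by simp) htt']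
      push_cast
      simp
      ring
    | cons a rest =>
      have hfa : (decide (a < ch) : Bool) = false := by
        have hne : ss.dropWhile (fun a => decide (a < ch)) ≠ [] := by simp [hdrop]
        have := List.head_dropWhile_not (fun a => decide (a < ch)) hne
        simp only [hdrop, List.head_cons] at this
        exact this
      have hach : ¬ a < ch := by simpa using hfa
      have hdsorted : (a :: rest).Pairwise (· ≤ ·) :=
        hdrop ▸ hss.sublist (List.dropWhile_sublist _)
      have harest : ∀ y ∈ rest, a ≤ y := (List.pairwise_cons.1 hdsorted).1
      have hrest : rest.Pairwise (· ≤ ·) := (List.pairwise_cons.1 hdsorted).2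
      have hcount : ∀ c, List.count c ss =
          List.count c (ss.takeWhile (fun a => decide (a < ch))) + List.count c (a :: rest) := by
        intro c
        conv_lhs => rw [← hsplit, hdrop]
        simp [List.count_append]
      by_cases hac : a = ch
      · subst hac
        have hm : ((a :: tt : List Char) : Multiset Char) - ↑ss
            = (↑tt : Multiset Char) - ↑rest := by
          ext c
          simp only [Multiset.count_sub, Multiset.coe_count]
          rcases lt_or_ge c a with hc | hc
          · have h1 : List.count c (a :: tt) = 0 := count_eq_zero_of_lt_all (by
              intro y hy
              rcases List.mem_cons.1 hy with rfl | hy'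
              · exact hc
              · exact lt_of_lt_of_le hc (hch y hy'))
            have h2 : List.count c tt = 0 := count_eq_zero_of_lt_all
              (fun y hy => lt_of_lt_of_le hc (hch y hy))
            have h3 : List.count c rest = 0 := count_eq_zero_of_lt_all
              (fun y hy => lt_of_lt_of_le hc (harest y hy))
            simp [h1, h2, h3]
          · have h4 : List.count c (ss.takeWhile (fun x => decide (x < a))) = 0 :=
              List.count_eq_zero.2 (fun hmem => absurd (hpre c hmem) (not_lt.2 hc))
            have h5 := hcount c
            rw [h4, Nat.zero_add] at h5
            rw [h5]
            by_cases hcc : a = c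
            · simp only [List.count_cons, hcc]
              omega
            · simp [hcc]
        simp only [solveWalk, hdrop]
        rw [hm]
        exact ih rest hrest htt'
      · have hcha : ch < a := (not_lt.1 hach).lt_of_ne (Ne.symm hac)
        have hm : ((ch :: tt : List Char) : Multiset Char) - ↑ss
            = ch ::ₘ ((↑tt : Multiset Char) - ↑(a :: rest)) := by
          ext c
          simp only [Multiset.count_sub, Multiset.coe_count, Multiset.count_cons]
          rcases lt_or_ge c ch with hc | hc
          · have h1 : List.count c (ch :: tt) = 0 := count_eq_zero_of_lt_all (by
              intro y hy
              rcases List.mem_cons.1 hy with rfl | hy'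
              · exact hc
              · exact lt_of_lt_of_le hc (hch y hy'))
            have h2 : List.count c tt = 0 := count_eq_zero_of_lt_all
              (fun y hy => lt_of_lt_of_le hc (hch y hy))
            have h3 : List.count c (a :: rest) = 0 := count_eq_zero_of_lt_all (by
              intro y hy
              rcases List.mem_cons.1 hy with rfl | hy'
              · exact lt_trans hc hcha
              · exact lt_of_lt_of_le (lt_trans hc hcha) (harest y hy'))
            have hcc : c ≠ ch := ne_of_lt hc
            simp [h1, h2, h3, hcc]
          · have h4 : List.count c (ss.takeWhile (fun x => decide (x < ch))) = 0 :=
              List.count_eq_zero.2 (fun hmem => absurd (hpre c hmem) (not_lt.2 hc))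
            have h5 := hcount c
            rw [h4, Nat.zero_add] at h5
            rw [h5]
            by_cases hcc : c = ch
            · subst hcc
              have h6 : List.count c (a :: rest) = 0 := count_eq_zero_of_lt_all (by
                intro y hy
                rcases List.mem_cons.1 hy with rfl | hy'
                · exact hcha
                · exact lt_of_lt_of_le hcha (harest y hy'))
              simp [h6]
            · by_cases hca : a = c <;>
                simp [hcc, Ne.symm hcc, hca]
        simp only [solveWalk, hdrop, if_neg hac]
        rw [hm, Multiset.card_cons, ih (a :: rest) hdsorted htt']
        push_cast
        ring

-- ===== VERDICT (by name: the statement is the Claim_ definition above) =====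
theorem solve_spec : Claim_equal_solve := by
  intro s t _
  unfold Spec_solve solve_alt
  have hps : ((PySem.List.sorted s.toList (fun c => c) false : List Char) : Multiset Char)
      = ↑s.toList := Multiset.coe_eq_coe.2 (PySem.List.sorted_perm s.toList (fun c => c) false)
  have hpt : ((PySem.List.sorted t.toList (fun c => c) false : List Char) : Multiset Char)
      = ↑t.toList := Multiset.coe_eq_coe.2 (PySem.List.sorted_perm t.toList (fun c => c) false)
  rw [solveWalk_card _ _ (PySem.List.sorted_pairwise _ _) (PySem.List.sorted_pairwise _ _),
    hps, hpt, solve_eq]
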